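-- pv_equiv track=rewrite | github.com/MattThePerson/CandyPopVideo_v2 | src/scan/scan.py | _process_collection_dirs
-- ===== SOURCE A (Python) =====
-- def _process_collection_dirs(collections: dict[str, list]):
--     include_folders: list[str] = []
--     ignore_folders: list[str] = []
--     folder_collection: dict = {}
--
--     for name, folders in collections.items():
--         if folders:
--             inc_fol = [ x for x in folders if not x.startswith('!') ]
--             ig_fol = [ x.replace('!','').strip() for x in folders if x not in inc_fol ]
--             ignore_folders.extend(ig_fol)
--             include_folders.extend(inc_fol)
--             for f in inc_fol:
--                 folder_collection[f] = name
--
--     return include_folders, ignore_folders, folder_collection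
-- ===== SOURCE B (Python) =====
-- def _process_collection_dirs(collections: dict[str, list]):
--     include_folders: list[str] = []
--     ignore_folders: list[str] = []
--     folder_collection: dict = {}
--
--     for name, folders in collections.items():
--         for f in folders:
--             if f.startswith('!'):
--                 ignore_folders.append(f.replace('!', '').strip())
--             else:
--                 include_folders.append(f)
--                 folder_collection[f] = name
--
--     return include_folders, ignore_folders, folder_collection
-- ===== Notes on version B (the rewrite author's own statement) =====
-- stated objective: simpler
-- what changed: Replaces A's three passes per collection (build include list, re-filter the folder list by O(n^2) membership in it, then a third loop to map folders) with one classifying pass that appends each entry to the right list and records the mapping as it goes.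
import Mathlib
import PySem

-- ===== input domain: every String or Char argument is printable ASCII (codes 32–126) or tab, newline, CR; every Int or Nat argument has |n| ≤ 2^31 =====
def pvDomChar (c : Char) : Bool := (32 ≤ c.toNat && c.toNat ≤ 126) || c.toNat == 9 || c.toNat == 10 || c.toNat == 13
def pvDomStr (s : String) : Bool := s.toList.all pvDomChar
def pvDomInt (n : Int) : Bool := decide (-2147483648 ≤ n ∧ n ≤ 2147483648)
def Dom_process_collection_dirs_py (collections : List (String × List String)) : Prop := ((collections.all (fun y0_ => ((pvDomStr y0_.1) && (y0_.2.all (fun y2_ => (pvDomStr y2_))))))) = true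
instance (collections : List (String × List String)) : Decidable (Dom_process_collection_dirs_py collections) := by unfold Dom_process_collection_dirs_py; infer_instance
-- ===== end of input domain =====

-- B replaces A's build-include / filter-by-membership / remap passes with one classifying pass per folder list (simpler, no quadratic membership test).


-- ===== PORT A =====
-- x.replace('!','').strip()  (shared by both Pythons verbatim)
def pvRepBang (x : String) : String := PySem.Str.strip (PySem.Str.replace x "!" "")

-- one iteration of A's outer loop (one (name, folders) item)
def pvAStep (st : List String × List String × PySem.Dict String String)
    (p : String × List String) : List String × List String × PySem.Dict String String :=
  if p.2 ≠ [] then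
    let inc_fol := p.2.filter (fun x => !(PySem.Str.startswith x "!"))
    let ig_fol := (p.2.filter (fun x => !(inc_fol.contains x))).map pvRepBang
    (st.1 ++ inc_fol, st.2.1 ++ ig_fol, inc_fol.foldl (fun d f => d.insert f p.1) st.2.2)
  else st

def process_collection_dirs_py (collections : List (String × List String)) :
    List String × List String × (List (String × String)) :=
  let r := collections.foldl pvAStep ([], [], PySem.Dict.empty)
  (r.1, r.2.1, r.2.2.items)

-- ===== PORT B =====
-- one iteration of B's inner loop (one folder entry, classified directly)
def pvBInner (name : String) (st : List String × List String × PySem.Dict String String)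
    (f : String) : List String × List String × PySem.Dict String String :=
  if PySem.Str.startswith f "!" then (st.1, st.2.1 ++ [pvRepBang f], st.2.2)
  else (st.1 ++ [f], st.2.1, st.2.2.insert f name)

def process_collection_dirs_py_alt (collections : List (String × List String)) :
    List String × List String × (List (String × String)) :=
  let r := collections.foldl (fun st p => p.2.foldl (pvBInner p.1) st) ([], [], PySem.Dict.empty)
  (r.1, r.2.1, r.2.2.items)

-- ===== PRECONDITION & SPEC =====
def Spec_process_collection_dirs_py (collections : List (String × List String)) (out : List String × List String × (List (String × String))) : Prop := out = process_collection_dirs_py_alt collections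
instance (collections : List (String × List String)) (out : List String × List String × (List (String × String))) : Decidable (Spec_process_collection_dirs_py collections out) := by unfold Spec_process_collection_dirs_py; infer_instance

-- ===== CLAIM (what is proved, stated in full; the proofs are below) =====
def Claim_equal_process_collection_dirs_py : Prop := ∀ (collections : List (String × List String)), Dom_process_collection_dirs_py collections → Spec_process_collection_dirs_py collections (process_collection_dirs_py collections)

-- ===== LEMMAS AND PROOFS =====

-- B's inner loop, in closed form over one folder list
theorem pvB_inner_eq (name : String) (folders : List String)
    (inc ig : List String) (fc : PySem.Dict String String) :
    folders.foldl (pvBInner name) (inc, ig, fc) =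
      (inc ++ folders.filter (fun x => !(PySem.Str.startswith x "!")),
       ig ++ (folders.filter (fun x => PySem.Str.startswith x "!")).map pvRepBang,
       (folders.filter (fun x => !(PySem.Str.startswith x "!"))).foldl
         (fun d f => d.insert f name) fc) := by
  induction folders generalizing inc ig fc with
  | nil => simp
  | cons f rest ih =>
    by_cases h : PySem.Chars.startswith f.toList ['!'] = true <;>
      simp [List.foldl_cons, pvBInner, h, ih]

-- A's "x not in inc_fol" test is exactly "x.startswith('!')" for x drawn from folders
theorem pvFilter_not_mem (folders : List String) :
    folders.filter
        (fun x => !((folders.filter (fun x => !(PySem.Str.startswith x "!"))).contains x))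
      = folders.filter (fun x => PySem.Str.startswith x "!") := by
  apply List.filter_congr
  intro x hx
  by_cases h : PySem.Chars.startswith x.toList ['!'] = true <;>
    simp [h, List.mem_filter, hx]

-- one A-step equals B's inner loop on the same state
theorem pvStep_eq (st : List String × List String × PySem.Dict String String)
    (p : String × List String) : pvAStep st p = p.2.foldl (pvBInner p.1) st := by
  obtain ⟨inc, ig, fc⟩ := st
  by_cases h : p.2 = []
  · simp [pvAStep, h]
  · simp only [pvAStep, h, ne_eq, not_false_iff, if_pos, pvFilter_not_mem, pvB_inner_eq]

-- ===== VERDICT (by name: the statement is the Claim_ definition above) =====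
theorem process_collection_dirs_py_spec : Claim_equal_process_collection_dirs_py := by
  intro collections _
  show _ = _
  unfold process_collection_dirs_py process_collection_dirs_py_alt
  have : collections.foldl pvAStep ([], [], PySem.Dict.empty)
      = collections.foldl (fun st p => p.2.foldl (pvBInner p.1) st) ([], [], PySem.Dict.empty) := by
    congr 1
    funext st p
    exact pvStep_eq st p
  rw [this]
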